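-- pv_equiv track=rewrite | github.com/hbenda-pph/consolidated_central_project_data | generate_silver_views_job.py | determine_consensus_type
-- ===== SOURCE A (Python) =====
-- def determine_consensus_type(types_list):
--     """
--     Determina el tipo consenso basado en prioridades
--     """
--     type_priority = {
--         'STRING': 1,
--         'INT64': 2,
--         'FLOAT64': 3,
--         'BOOL': 4,
--         'DATE': 5,
--         'DATETIME': 6,
--         'TIMESTAMP': 7,
--         'JSON': 8,
--         'BYTES': 9
--     }
--
--     # Contar ocurrencias de cada tipo
--     type_counts = {}
--     for t in types_list:
--         type_counts[t] = type_counts.get(t, 0) + 1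
--
--     # Ordenar por prioridad y luego por frecuencia
--     types = sorted(type_counts.keys(),
--                   key=lambda x: (type_priority.get(x, 999), -type_counts[x]))
--
--     return types[0]
-- ===== SOURCE B (Python) =====
-- def determine_consensus_type(types_list):
--     counts = {}
--     for t in types_list:
--         counts[t] = counts.get(t, 0) + 1
--     for p in ('STRING', 'INT64', 'FLOAT64', 'BOOL', 'DATE',
--               'DATETIME', 'TIMESTAMP', 'JSON', 'BYTES'):
--         if p in counts:
--             return p
--     return max(counts, key=counts.get)
-- ===== Notes on version B (the rewrite author's own statement) =====
-- stated objective: simpler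
-- what changed: Replaced the tuple-key sort of the count dict by a direct scan of the fixed priority order (first known type present wins, since distinct priorities make frequency irrelevant) with a single max over first-seen counts as the fallback for all-unknown types.
import Mathlib
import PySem

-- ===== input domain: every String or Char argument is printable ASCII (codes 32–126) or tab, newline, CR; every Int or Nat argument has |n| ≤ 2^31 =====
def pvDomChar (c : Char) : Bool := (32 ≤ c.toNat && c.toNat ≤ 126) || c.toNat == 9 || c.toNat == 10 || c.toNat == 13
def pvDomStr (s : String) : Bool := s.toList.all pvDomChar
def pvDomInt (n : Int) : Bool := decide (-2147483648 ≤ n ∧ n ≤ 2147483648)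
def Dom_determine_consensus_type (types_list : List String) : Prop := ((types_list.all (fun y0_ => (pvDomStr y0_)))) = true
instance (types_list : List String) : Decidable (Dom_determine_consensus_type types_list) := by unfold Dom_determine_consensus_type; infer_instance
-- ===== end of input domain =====

-- ===== PORT A =====
-- B replaces the tuple-key sort by a scan of the fixed priority order with a max-count fallback (objective: simpler).
-- A raises IndexError on the empty list (types[0]); Pre_ excludes it.
def pvTypePriority : PySem.Dict String Int := PySem.Dict.ofList
  [("STRING", 1), ("INT64", 2), ("FLOAT64", 3), ("BOOL", 4), ("DATE", 5),
   ("DATETIME", 6), ("TIMESTAMP", 7), ("JSON", 8), ("BYTES", 9)]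

def determine_consensus_type (types_list : List String) : String :=
  let type_counts := types_list.foldl (fun d t => d.insert t (d.getD t 0 + 1)) (PySem.Dict.empty : PySem.Dict String Int)
  let types := PySem.List.sorted2 type_counts.keys
      (fun x => pvTypePriority.getD x 999) (fun x => -(type_counts.getD x 0))
  types.headD ""   -- types[0]; Python raises IndexError when empty (excluded by Pre_)

-- ===== PORT B =====
def pvPriorityOrder : List String :=
  ["STRING", "INT64", "FLOAT64", "BOOL", "DATE", "DATETIME", "TIMESTAMP", "JSON", "BYTES"]

def determine_consensus_type_alt (types_list : List String) : String :=
  let counts := types_list.foldl (fun d t => d.insert t (d.getD t 0 + 1)) (PySem.Dict.empty : PySem.Dict String Int)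
  match pvPriorityOrder.find? (fun p => counts.contains p) with
  | some p => p
  | none => (PySem.List.max? counts.keys (fun k => counts.getD k 0)).getD ""
      -- max(counts, key=counts.get); Python raises ValueError when empty (excluded by Pre_)

-- ===== PRECONDITION & SPEC =====
-- Pre_ excludes the empty list, on which A raises IndexError (and B raises ValueError).
def Pre_determine_consensus_type (types_list : List String) : Prop := types_list ≠ []
instance (types_list : List String) : Decidable (Pre_determine_consensus_type types_list) := by
  unfold Pre_determine_consensus_type; infer_instance
def pvWitness_determine_consensus_type : List String := ["STRING", "foo"]

def Spec_determine_consensus_type (types_list : List String) (out : String) : Prop := out = determine_consensus_type_alt types_list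
instance (types_list : List String) (out : String) : Decidable (Spec_determine_consensus_type types_list out) := by unfold Spec_determine_consensus_type; infer_instance

-- ===== CLAIM (what is proved, stated in full; the proofs are below) =====
def Claim_equal_determine_consensus_type : Prop := ∀ (types_list : List String), Dom_determine_consensus_type types_list → Pre_determine_consensus_type types_list → Spec_determine_consensus_type types_list (determine_consensus_type types_list)

-- ===== LEMMAS AND PROOFS =====

-- the option-valued "first minimal element" step of an insertion-sort head
def pvStepMin (lt : String → String → Bool) (o : Option String) (x : String) : Option String :=
  match o with
  | none => some x
  | some m => if lt x m then some x else some m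

theorem pv_head_foldl_insertBy (lt : String → String → Bool) :
    ∀ (xs acc : List String),
      (xs.foldl (fun a x => PySem.List.insertBy lt x a) acc).head? = xs.foldl (pvStepMin lt) acc.head? := by
  intro xs
  induction xs with
  | nil => intro acc; rfl
  | cons x xs ih =>
    intro acc
    simp only [List.foldl_cons]
    rw [ih]
    congr 1
    cases acc with
    | nil => rfl
    | cons a t =>
      simp only [PySem.List.insertBy, pvStepMin]
      by_cases h : lt x a <;> simp [h]

theorem pv_fmin_inv (lt : String → String → Bool) (k1 : String → Int)
    (h1 : ∀ x m, lt x m = true → k1 x ≤ k1 m) (h2 : ∀ x m, lt x m = false → k1 m ≤ k1 x) :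
    ∀ (xs : List String) (m' : String), ∃ m, xs.foldl (pvStepMin lt) (some m') = some m ∧
      (m = m' ∨ m ∈ xs) ∧ k1 m ≤ k1 m' ∧ ∀ y ∈ xs, k1 m ≤ k1 y := by
  intro xs
  induction xs with
  | nil => intro m'; exact ⟨m', rfl, Or.inl rfl, le_refl _, by simp⟩
  | cons x xs ih =>
    intro m'
    simp only [List.foldl_cons, pvStepMin]
    by_cases h : lt x m'
    · simp only [h, if_true]
      obtain ⟨m, heq, hmem, hle, hall⟩ := ih x
      refine ⟨m, heq, ?_, ?_, ?_⟩
      · rcases hmem with h' | h' <;> simp [h']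
      · exact le_trans hle (h1 _ _ h)
      · intro y hy
        rcases List.mem_cons.mp hy with h' | h'
        · subst h'; exact hle
        · exact hall y h'
    · simp only [h]
      obtain ⟨m, heq, hmem, hle, hall⟩ := ih m'
      refine ⟨m, heq, ?_, hle, ?_⟩
      · rcases hmem with h' | h' <;> simp [h']
      · intro y hy
        rcases List.mem_cons.mp hy with h' | h'
        · subst h'; exact le_trans hle (h2 _ _ (by simpa using h))
        · exact hall y h'

theorem pv_fold_congr (lt : String → String → Bool) (cnt k1 : String → Int)
    (hlt : ∀ x m, k1 x = 999 → k1 m = 999 → lt x m = decide (cnt m < cnt x)) :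
    ∀ (xs : List String) (acc : Option String), (∀ x ∈ xs, k1 x = 999) →
      (∀ m, acc = some m → k1 m = 999) →
      xs.foldl (pvStepMin lt) acc
        = xs.foldl (fun acc x => match acc with
            | none => some x
            | some m => if cnt m < cnt x then some x else some m) acc := by
  intro xs
  induction xs with
  | nil => intro acc _ _; rfl
  | cons x xs ih =>
    intro acc hall hacc
    simp only [List.foldl_cons]
    have hx : k1 x = 999 := hall x (List.mem_cons_self)
    have htail : ∀ y ∈ xs, k1 y = 999 := fun y hy => hall y (List.mem_cons_of_mem _ hy)
    cases acc with
    | none =>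
      show List.foldl (pvStepMin lt) (some x) xs = _
      exact ih (some x) htail (fun m hm => by simp at hm; subst hm; exact hx)
    | some m =>
      have hm999 : k1 m = 999 := hacc m rfl
      have hstep : pvStepMin lt (some m) x = if cnt m < cnt x then some x else some m := by
        simp only [pvStepMin, hlt x m hx hm999]
        split <;> simp_all
      rw [hstep]
      by_cases hc : cnt m < cnt x <;> simp only [hc, if_true, if_false]
      · exact ih (some x) htail (fun m' hm' => by simp at hm'; subst hm'; exact hx)
      · exact ih (some m) htail (fun m' hm' => by simp at hm'; subst hm'; exact hm999)

theorem pv_k1_eq (x : String) : pvTypePriority.getD x 999 =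
    (if "STRING" = x then 1 else if "INT64" = x then 2 else if "FLOAT64" = x then 3 else
     if "BOOL" = x then 4 else if "DATE" = x then 5 else if "DATETIME" = x then 6 else
     if "TIMESTAMP" = x then 7 else if "JSON" = x then 8 else if "BYTES" = x then 9 else (999 : Int)) := by
  have h : pvTypePriority = PySem.Dict.mk
    [("STRING", 1), ("INT64", 2), ("FLOAT64", 3), ("BOOL", 4), ("DATE", 5),
     ("DATETIME", 6), ("TIMESTAMP", 7), ("JSON", 8), ("BYTES", 9)] := by decide
  rw [h, PySem.Dict.getD_eq_get?_getD]
  simp only [PySem.Dict.get?_mk_cons, beq_iff_eq]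
  split_ifs <;> simp [PySem.Dict.get?]

theorem pv_mem_or_999 (x : String) : x ∈ pvPriorityOrder ∨ pvTypePriority.getD x 999 = 999 := by
  rw [pv_k1_eq]
  split_ifs <;> first | (left; subst_vars; decide) | (right; rfl)

theorem pv_pairwise : pvPriorityOrder.Pairwise
    (fun a b => pvTypePriority.getD a 999 < pvTypePriority.getD b 999) := by decide

theorem pv_lt999 : ∀ p ∈ pvPriorityOrder, pvTypePriority.getD p 999 < 999 := by decide

-- ===== VERDICT (by name: the statement is the Claim_ definition above) =====
theorem determine_consensus_type_spec : Claim_equal_determine_consensus_type := by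
  intro tl _ _
  unfold Spec_determine_consensus_type determine_consensus_type determine_consensus_type_alt
  simp only []
  set counts := tl.foldl (fun d t => d.insert t (d.getD t 0 + 1)) (PySem.Dict.empty : PySem.Dict String Int) with hcounts
  set k1 : String → Int := fun x => pvTypePriority.getD x 999 with hk1
  set k2 : String → Int := fun x => -(counts.getD x 0) with hk2
  set cnt : String → Int := fun k => counts.getD k 0 with hcnt
  set ks := counts.keys with hks
  set lt : String → String → Bool :=
    fun a b => decide (k1 a < k1 b) || (!decide (k1 b < k1 a) && decide (k2 a < k2 b)) with hlt
  have hs2 : PySem.List.sorted2 ks k1 k2 = ks.foldl (fun acc x => PySem.List.insertBy lt x acc) [] := rfl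
  have hltk1 : ∀ x m, lt x m = true → k1 x ≤ k1 m := by
    intro x m h
    simp only [hlt, Bool.or_eq_true, Bool.and_eq_true, Bool.not_eq_true', decide_eq_true_eq] at h
    rcases h with h | ⟨h, _⟩
    · exact le_of_lt h
    · simp only [decide_eq_false_iff_not, not_lt] at h
      exact h
  have hltk2 : ∀ x m, lt x m = false → k1 m ≤ k1 x := by
    intro x m h
    simp only [hlt, Bool.or_eq_false_iff] at h
    have := h.1
    simp only [decide_eq_false_iff_not, not_lt] at this
    exact this
  have hcontains : ∀ y, counts.contains y = true ↔ y ∈ ks :=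
    fun y => PySem.Dict.contains_iff_mem_keys counts y
  rw [List.headD_eq_head?_getD, hs2, pv_head_foldl_insertBy]
  cases hf : pvPriorityOrder.find? (fun p => counts.contains p) with
  | some p =>
    obtain ⟨hp, as, bs, hP, hprev⟩ := List.find?_eq_some_iff_append.mp hf
    have hpmem : p ∈ ks := (hcontains p).mp hp
    have hpP : p ∈ pvPriorityOrder := by rw [hP]; exact List.mem_append_right _ List.mem_cons_self
    have hp999 : k1 p < 999 := pv_lt999 p hpP
    cases hks' : ks with
    | nil => rw [hks'] at hpmem; simp at hpmem
    | cons k t =>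
      simp only [List.head?_nil, List.foldl_cons]
      have hstep0 : pvStepMin lt none k = some k := rfl
      rw [hstep0]
      obtain ⟨m, heq, hmem, hlek, hallt⟩ := pv_fmin_inv lt k1 hltk1 hltk2 t k
      rw [heq]
      have hmks : m ∈ ks := by
        rw [hks']
        rcases hmem with h' | h'
        · simp [h']
        · exact List.mem_cons_of_mem _ h'
      have hmin : ∀ y ∈ ks, k1 m ≤ k1 y := by
        intro y hy
        rw [hks'] at hy
        rcases List.mem_cons.mp hy with h' | h'
        · subst h'; exact hlek
        · exact hallt y h'
      have hmlep : k1 m ≤ k1 p := hmin p hpmem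
      have hmP : m ∈ pvPriorityOrder := by
        rcases pv_mem_or_999 m with h' | h'
        · exact h'
        · exfalso
          have hm999 : k1 m = 999 := h'
          omega
      show m = p
      rw [hP] at hmP
      rcases List.mem_append.mp hmP with h' | h'
      · exfalso
        have := hprev m h'
        have hcm : counts.contains m = true := (hcontains m).mpr hmks
        simp [hcm] at this
      · rcases List.mem_cons.mp h' with h'' | h''
        · exact h''
        · exfalso
          have hpw := pv_pairwise
          rw [hP] at hpw
          have hplt : k1 p < k1 m := by
            have h2 := (List.pairwise_append.mp hpw).2.1
            have := (List.pairwise_cons.mp h2).1 m h''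
            simpa [hk1] using this
          omega
  | none =>
    have hnone := List.find?_eq_none.mp hf
    have hall : ∀ y ∈ ks, k1 y = 999 := by
      intro y hy
      rcases pv_mem_or_999 y with h' | h'
      · exfalso
        have := hnone y h'
        have : counts.contains y = true := (hcontains y).mpr hy
        simp_all
      · rw [hk1]; simpa using h'
    have hltcnt : ∀ x m, k1 x = 999 → k1 m = 999 → lt x m = decide (cnt m < cnt x) := by
      intro x m hx hm
      rw [hlt]
      simp only [hx, hm, hk2, hcnt]
      simp [neg_lt_neg_iff]
    rw [pv_fold_congr lt cnt k1 hltcnt ks ([].head?) hall (by simp)]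
    have hmax : PySem.List.max? ks cnt = ks.foldl (fun acc x => match acc with
        | none => some x
        | some m => if cnt m < cnt x then some x else some m) none := by
      unfold PySem.List.max?
      congr 1
      funext o x
      cases o <;> rfl
    show _ = (PySem.List.max? ks cnt).getD ""
    simp only [List.head?_nil]
    rw [hmax]
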